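-- pv_equiv track=rewrite | github.com/onyueo/algorithm-study | 프로그래머스/1/135808. 과일 장수/과일 장수.py | solution
-- ===== SOURCE A (Python) =====
-- def solution(k, m, score):
--     answer = 0
--     score.sort(reverse=True)
--
--     num_boxes = len(score) // m
--
--     for i in range(num_boxes):
--         box = score[i*m : (i+1)*m]
--         answer += box[m-1] * m
--
--     return answer
-- ===== SOURCE B (Python) =====
-- def solution(k, m, score):
--     # Counting approach: tally each score once, then walk the distinct scores in
--     # descending order, locating each box minimum (positions m-1, 2m-1, ...)
--     # by cumulative counts; no sort of the full list, no per-box slicing.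
--     # (A sorts `score` in place; B leaves it unmutated — return values agree.)
--     cnt = {}
--     for s in score:
--         cnt[s] = cnt.get(s, 0) + 1
--     vals = sorted(cnt, reverse=True)
--     total = 0
--     covered = 0
--     v = 0
--     i = 0
--     for j in range(1, len(score) // m + 1):
--         target = j * m - 1
--         while covered <= target:
--             v = vals[i]
--             covered += cnt[v]
--             i += 1
--         total += v * m
--     return total
-- ===== Notes on version B (the rewrite author's own statement) =====
-- stated objective: alternative
-- what changed: A sorts the whole list descending and slices out each box to read its minimum; B never sorts the list: it builds a dict of counts, sorts only the distinct scores descending, and finds each box minimum (positions m-1, 2m-1, ...) with one cumulative-count pointer walk over the (value, count) runs.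
import Mathlib
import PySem

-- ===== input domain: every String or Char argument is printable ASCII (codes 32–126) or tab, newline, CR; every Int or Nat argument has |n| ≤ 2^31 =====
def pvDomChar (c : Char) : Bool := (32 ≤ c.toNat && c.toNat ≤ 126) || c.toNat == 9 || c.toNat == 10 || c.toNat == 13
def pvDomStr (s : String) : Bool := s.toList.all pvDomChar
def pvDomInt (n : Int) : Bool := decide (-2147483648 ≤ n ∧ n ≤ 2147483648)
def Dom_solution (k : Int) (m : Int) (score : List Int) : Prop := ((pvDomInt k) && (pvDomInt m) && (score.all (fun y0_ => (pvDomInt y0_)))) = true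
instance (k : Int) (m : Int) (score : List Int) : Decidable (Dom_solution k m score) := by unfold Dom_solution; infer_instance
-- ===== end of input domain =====

-- ===== PORT A =====
-- B replaces A's full descending sort + per-box slicing by a counting dict plus a
-- cumulative-count walk over the distinct scores (objective: alternative).
-- A sorts `score` in place; B does not mutate it — the equivalence proved is about the return value.
def solution (k : Int) (m : Int) (score : List Int) : Int :=
  let answer : Int := 0
  let score := PySem.List.sorted score (fun x => x) true
  let num_boxes := PySem.Int.floordiv (PySem.List.len score) m
  let answer := (PySem.List.pyRange 0 num_boxes 1).foldl
    (fun answer i =>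
      let box := PySem.List.slice score (some (i * m)) (some ((i + 1) * m))
      answer + PySem.List.pyGetD box (m - 1) 0 * m) answer
  answer

-- ===== PORT B =====
-- the inner `while covered <= target:` loop of Source B; the index i walking forward
-- through vals is represented by the remaining suffix `rest` of vals.
def bWhile (cnt : PySem.Dict Int Int) (target : Int) :
    List Int → Int → Int → List Int × Int × Int
  | rest, covered, v =>
    if covered ≤ target then
      match rest with
      | [] => ([], covered, v)   -- unreachable whenever m ≠ 0 (Python would raise IndexError)
      | x :: rs => bWhile cnt target rs (covered + cnt.getD x 0) x
    else (rest, covered, v)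

def solution_alt (k : Int) (m : Int) (score : List Int) : Int :=
  let cnt := score.foldl (fun d s => d.insert s (d.getD s 0 + 1)) PySem.Dict.empty
  let vals := PySem.List.sorted (PySem.Dict.keys cnt) (fun x => x) true
  let st := (PySem.List.pyRange 1 (PySem.Int.floordiv (PySem.List.len score) m + 1) 1).foldl
    (fun (st : (List Int × Int × Int) × Int) j =>
      let r := bWhile cnt (j * m - 1) st.1.1 st.1.2.1 st.1.2.2
      (r, st.2 + r.2.2 * m))
    ((vals, 0, 0), 0)
  st.2

-- ===== PRECONDITION & SPEC =====
-- Pre_ excludes only m = 0, where A raises ZeroDivisionError (so does B).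
def Pre_solution (k : Int) (m : Int) (score : List Int) : Prop := m ≠ 0
instance (k : Int) (m : Int) (score : List Int) : Decidable (Pre_solution k m score) := by unfold Pre_solution; infer_instance
def pvWitness_solution : Int × Int × List Int := (5, 2, [4, 1, 2, 3])

def Spec_solution (k : Int) (m : Int) (score : List Int) (out : Int) : Prop := out = solution_alt k m score
instance (k : Int) (m : Int) (score : List Int) (out : Int) : Decidable (Spec_solution k m score out) := by unfold Spec_solution; infer_instance

-- ===== CLAIM (what is proved, stated in full; the proofs are below) =====
def Claim_equal_solution : Prop := ∀ (k : Int) (m : Int) (score : List Int), Dom_solution k m score → Pre_solution k m score → Spec_solution k m score (solution k m score)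

-- ===== LEMMAS AND PROOFS =====

-- the distinct scores in descending order, as B's `vals` computes them
def pvVals (score : List Int) : List Int :=
  PySem.List.sorted (PySem.Set.ofList score) (fun x => x) true

-- run-length expansion: each distinct value repeated as often as it occurs in `score`
def pvExp (score vs : List Int) : List Int :=
  vs.flatMap (fun v => List.replicate (score.count v) v)

theorem pvVals_nodup (score : List Int) : (pvVals score).Nodup :=
  (PySem.List.sorted_perm _ _ _).nodup_iff.mpr (PySem.Set.nodup_ofList score)

theorem pvVals_mem (score : List Int) (v : Int) : v ∈ pvVals score ↔ v ∈ score := by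
  unfold pvVals
  rw [PySem.List.mem_sorted, PySem.Set.mem_ofList]

theorem pvExp_count (score : List Int) (vs : List Int) (h : vs.Nodup) (v : Int) :
    (pvExp score vs).count v = if v ∈ vs then score.count v else 0 := by
  induction vs with
  | nil => simp [pvExp]
  | cons x rs ih =>
    have hnd := h
    rw [List.nodup_cons] at hnd
    unfold pvExp at *
    rw [List.flatMap_cons, List.count_append, ih hnd.2, List.count_replicate]
    by_cases hv : v = x
    · subst hv
      simp [hnd.1]
    · simp [hv, Ne.symm hv]

theorem pvExp_perm (score : List Int) : (pvExp score (pvVals score)).Perm score := by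
  rw [List.perm_iff_count]
  intro v
  rw [pvExp_count score _ (pvVals_nodup score) v]
  by_cases hv : v ∈ score
  · simp [(pvVals_mem score v).mpr hv]
  · have h1 : v ∉ pvVals score := fun h => hv ((pvVals_mem score v).mp h)
    simp [h1, List.count_eq_zero_of_not_mem hv]

theorem pvVals_pairwise (score : List Int) : (pvVals score).Pairwise (fun a b => b < a) := by
  have h1 : (pvVals score).Pairwise (fun a b : Int => b ≤ a) := by
    have := PySem.List.sorted_pairwise_rev (PySem.Set.ofList score) (fun x : Int => x)
    simpa [pvVals] using this
  have h2 : (pvVals score).Pairwise (fun a b : Int => a ≠ b) := pvVals_nodup score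
  exact (h1.and h2).imp (fun {a b} hab => lt_of_le_of_ne hab.1 (Ne.symm hab.2))

theorem pvExp_pairwise (score vs : List Int) (h : vs.Pairwise (fun a b => b < a)) :
    (pvExp score vs).Pairwise (fun a b : Int => b ≤ a) := by
  induction vs with
  | nil => simp [pvExp]
  | cons x rs ih =>
    rw [List.pairwise_cons] at h
    unfold pvExp at *
    rw [List.flatMap_cons, List.pairwise_append]
    refine ⟨List.pairwise_replicate.mpr (by simp), ih h.2, ?_⟩
    intro a ha b hb
    rw [List.eq_of_mem_replicate ha]
    rw [List.mem_flatMap] at hb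
    obtain ⟨w, hw, hbw⟩ := hb
    rw [List.eq_of_mem_replicate hbw]
    exact le_of_lt (h.1 w hw)

-- the run-length expansion of the descending distinct values IS A's sorted list
theorem pvExp_eq_sorted (score : List Int) :
    pvExp score (pvVals score) = PySem.List.sorted score (fun x => x) true := by
  refine List.Perm.eq_of_pairwise
    (fun a b _ _ h1 h2 => le_antisymm h2 h1)
    (pvExp_pairwise score _ (pvVals_pairwise score)) ?_
    ((pvExp_perm score).trans (PySem.List.sorted_perm score (fun x => x) true).symm)
  have := PySem.List.sorted_pairwise_rev score (fun x : Int => x)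
  simpa using this

theorem pvExp_append (score a b : List Int) :
    pvExp score (a ++ b) = pvExp score a ++ pvExp score b := by
  unfold pvExp; exact List.flatMap_append

-- the while loop consumes runs until the cumulative count passes `target`;
-- afterwards v is the element of the expanded (= sorted) list at every
-- position in [target, covered)
theorem bWhile_spec (score : List Int) (cntd : PySem.Dict Int Int)
    (hcnt : ∀ x, cntd.getD x 0 = (score.count x : Int)) (target : Int) :
    ∀ (rest done : List Int) (c v t0 : Int),
    pvVals score = done ++ rest →
    c = ((pvExp score done).length : Int) →
    (∀ t : Int, 0 ≤ t → t0 ≤ t → t < c → (pvExp score (pvVals score)).getD t.toNat 0 = v) →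
    t0 ≤ target →
    target < c + ((pvExp score rest).length : Int) →
    ∃ rest' done' c' v',
      bWhile cntd target rest c v = (rest', c', v') ∧
      pvVals score = done' ++ rest' ∧
      c' = ((pvExp score done').length : Int) ∧
      (∀ t : Int, 0 ≤ t → target ≤ t → t < c' → (pvExp score (pvVals score)).getD t.toNat 0 = v') ∧
      target < c' := by
  intro rest
  induction rest with
  | nil =>
    intro done c v t0 hsplit hc hval ht0 hbound
    have hlt : target < c := by simpa [pvExp] using hbound
    refine ⟨[], done, c, v, ?_, hsplit, hc, ?_, hlt⟩
    · unfold bWhile; rw [if_neg (by omega)]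
    · intro t h0 hge hltc; exact hval t h0 (le_trans ht0 hge) hltc
  | cons x rs ih =>
    intro done c v t0 hsplit hc hval ht0 hbound
    by_cases hcle : c ≤ target
    · have hstep : bWhile cntd target (x :: rs) c v
          = bWhile cntd target rs (c + cntd.getD x 0) x := by
        rw [bWhile.eq_def]
        show (if c ≤ target then _ else _) = _
        rw [if_pos hcle]
      rw [hstep, hcnt x]
      have hsplit2 : pvVals score = (done ++ [x]) ++ rs := by
        rw [hsplit, List.append_assoc]; rfl
      have hc2 : c + (score.count x : Int) = ((pvExp score (done ++ [x])).length : Int) := by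
        rw [pvExp_append, List.length_append, hc]
        have : (pvExp score [x]).length = score.count x := by
          simp [pvExp]
        omega
      have hval2 : ∀ t : Int, 0 ≤ t → target ≤ t → t < c + (score.count x : Int) →
          (pvExp score (pvVals score)).getD t.toNat 0 = x := by
        intro t h0 hge hlt2
        have hE : pvExp score (pvVals score)
            = pvExp score done ++ (List.replicate (score.count x) x ++ pvExp score rs) := by
          rw [hsplit, pvExp_append]
          simp [pvExp]
        rw [hE]
        have h1 : (pvExp score done).length ≤ t.toNat := by omega
        have h2 : t.toNat - (pvExp score done).length < score.count x := by omega
        rw [List.getD_eq_getElem?_getD, List.getElem?_append_right h1]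
        rw [List.getElem?_append_left (by simpa using h2)]
        simp [h2]
      have hbound2 : target < c + (score.count x : Int) + ((pvExp score rs).length : Int) := by
        have : (pvExp score (x :: rs)).length
            = score.count x + (pvExp score rs).length := by
          simp [pvExp]
        omega
      exact ih (done ++ [x]) (c + (score.count x : Int)) x target hsplit2 hc2 hval2 le_rfl hbound2
    · refine ⟨x :: rs, done, c, v, ?_, hsplit, hc, ?_, by omega⟩
      · unfold bWhile; rw [if_neg hcle]
      · intro t h0 hge hltc; exact hval t h0 (le_trans ht0 hge) hltc

theorem pvExp_len (score : List Int) :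
    (pvExp score (pvVals score)).length = score.length :=
  (pvExp_perm score).length_eq

-- B's outer loop over the boxes: after n boxes the total is m times the sum of
-- the expanded list's entries at positions m-1, 2m-1, ..., n*m-1
theorem bOuter (score : List Int) (cntd : PySem.Dict Int Int)
    (hcnt : ∀ x, cntd.getD x 0 = (score.count x : Int)) (m' : Nat) (hm : 1 ≤ m') :
    ∀ n : Nat, n ≤ score.length / m' →
    ∃ rest done c v,
      (((List.range n).map (fun i : Nat => (1 : Int) + (i : Int))).foldl
        (fun (st : (List Int × Int × Int) × Int) j =>
          let r := bWhile cntd (j * (m' : Int) - 1) st.1.1 st.1.2.1 st.1.2.2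
          (r, st.2 + r.2.2 * (m' : Int)))
        ((pvVals score, 0, 0), 0))
      = ((rest, c, v),
         (m' : Int) * (((List.range n).map
            (fun x => (pvExp score (pvVals score)).getD (x * m' + (m' - 1)) 0)).sum)) ∧
      pvVals score = done ++ rest ∧
      c = ((pvExp score done).length : Int) ∧
      (∀ t : Int, 0 ≤ t → (n : Int) * m' - 1 ≤ t → t < c →
        (pvExp score (pvVals score)).getD t.toNat 0 = v) := by
  intro n
  induction n with
  | zero =>
    intro _
    exact ⟨pvVals score, [], 0, 0, by simp, rfl, by simp [pvExp], by intro t _ _ h; omega⟩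
  | succ n ihn =>
    intro hle
    obtain ⟨rest, done, c, v, heq, hsplit, hc, hval⟩ := ihn (le_trans (Nat.le_succ n) hle)
    have htarget_nn : (0 : Int) ≤ ((1 : Int) + n) * (m' : Int) - 1 := by
      have : (1 : Int) ≤ (m' : Int) := by exact_mod_cast hm
      nlinarith [Int.natCast_nonneg n]
    have hbound : ((1 : Int) + n) * (m' : Int) - 1
        < c + ((pvExp score rest).length : Int) := by
      have hlen : (pvExp score done).length + (pvExp score rest).length = score.length := by
        have := pvExp_len score
        rw [hsplit, pvExp_append, List.length_append] at this
        exact this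
      have hmul : (n + 1) * m' ≤ score.length :=
        (Nat.le_div_iff_mul_le (by omega)).mp hle
      have : ((1 : Int) + n) * (m' : Int) = (((n + 1) * m' : Nat) : Int) := by
        push_cast; ring
      omega
    obtain ⟨rest', done', c', v', hw, hsplit', hc', hval', hlt'⟩ :=
      bWhile_spec score cntd hcnt (((1 : Int) + n) * (m' : Int) - 1)
        rest done c v ((n : Int) * m' - 1) hsplit hc hval
        (by nlinarith [Int.natCast_nonneg n, (by exact_mod_cast hm : (1:Int) ≤ (m' : Int))])
        hbound
    refine ⟨rest', done', c', v', ?_, hsplit', hc', ?_⟩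
    · rw [List.range_succ, List.map_append, List.foldl_append, heq]
      simp only [List.map_cons, List.map_nil, List.foldl_cons, List.foldl_nil]
      rw [hw]
      have hv'idx : v' = (pvExp score (pvVals score)).getD (n * m' + (m' - 1)) 0 := by
        have := hval' (((1 : Int) + n) * (m' : Int) - 1) htarget_nn le_rfl hlt'
        rw [← this]
        congr 1
        have h3 : ((1 : Int) + n) * (m' : Int) - 1 = ((n * m' + (m' - 1) : Nat) : Int) := by
          push_cast [Nat.cast_sub hm]; ring
        rw [h3, Int.toNat_natCast]
      simp only [List.map_append, List.sum_append, List.map_cons, List.map_nil,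
        List.sum_cons, List.sum_nil, Prod.mk.injEq]
      refine ⟨by simp, ?_⟩
      rw [hv'idx]
      ring
    · intro t h0 hge hltc
      refine hval' t h0 ?_ hltc
      have hcomm : ((1 : Int) + n) * (m' : Int) = ((n : Int) + 1) * (m' : Int) := by ring
      rw [hcomm]
      push_cast at hge
      omega

-- the box minimum A reads is the strided element of the whole sorted list
theorem pv_getD_box (d : List Int) (m' k : Nat) (hm : 1 ≤ m') :
    ((d.drop (k * m')).take m').getD (m' - 1) 0 = d.getD (k * m' + (m' - 1)) 0 := by
  unfold List.getD
  rw [List.getElem?_take_of_lt (by omega), List.getElem?_drop]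

-- A's per-box slicing loop, for positive m, is m times the same strided sum
theorem pvA_pos (d : List Int) (m' : Nat) (hm : 1 ≤ m') :
    (PySem.List.pyRange 0 (PySem.Int.floordiv (PySem.List.len d) (m' : Int)) 1).foldl
      (fun answer i =>
        answer + PySem.List.pyGetD (PySem.List.slice d (some (i * (m' : Int))) (some ((i + 1) * (m' : Int)))) ((m' : Int) - 1) 0 * (m' : Int)) 0
    = (m' : Int) * ((List.range (d.length / m')).map
        (fun x => d.getD (x * m' + (m' - 1)) 0)).sum := by
  rw [PySem.List.len_eq]
  have hm1 : (0 : Int) < (m' : Int) := by exact_mod_cast hm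
  have hfd : PySem.Int.floordiv ((d.length : Nat) : Int) ((m' : Int))
      = ((d.length / m' : Nat) : Int) := by
    unfold PySem.Int.floordiv
    rw [Int.fdiv_eq_ediv, if_pos (Or.inl (by positivity)), Int.natCast_div]
    ring
  rw [hfd, PySem.List.pyRange_one]
  have hN : ((((d.length / m' : Nat) : Int)) - 0).toNat = d.length / m' := by
    rw [Int.sub_zero, Int.toNat_natCast]
  rw [hN, List.foldl_map, PySem.List.foldl_add]
  simp only [zero_add]
  rw [← List.sum_map_mul_left]
  refine congrArg List.sum (List.map_congr_left ?_)
  intro x _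
  have e1 : ((x:Int)) * (m' : Int) = ((x * m' : Nat) : Int) := by push_cast; ring
  have e2 : ((x:Int) + 1) * (m' : Int) = (((x + 1) * m' : Nat) : Int) := by push_cast; ring
  have e3 : ((m' : Int) - 1) = ((m' - 1 : Nat) : Int) := by omega
  rw [e1, e2, e3, PySem.List.slice_natCast, PySem.List.pyGetD_natCast]
  have e5 : (x + 1) * m' - x * m' = m' := by rw [Nat.add_mul, one_mul, Nat.add_sub_cancel_left]
  rw [e5, pv_getD_box d m' x hm]
  ring

theorem pvB_counter (score : List Int) :
    score.foldl (fun d s => d.insert s (d.getD s 0 + 1)) PySem.Dict.empty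
      = PySem.Dict.counter score :=
  PySem.Dict.foldl_insert_getD_add_one_eq_counter score

theorem pvB_vals (score : List Int) :
    PySem.List.sorted (PySem.Dict.keys (PySem.Dict.counter score)) (fun x => x) true
      = pvVals score := by
  rw [PySem.Dict.keys_counter]
  rfl

theorem pv_main (k m : Int) (score : List Int) (hm : m ≠ 0) :
    solution k m score = solution_alt k m score := by
  simp only [solution, solution_alt, pvB_counter, pvB_vals]
  rcases lt_or_gt_of_ne hm with hneg | hpos
  · -- m < 0 : both loops are empty
    rw [PySem.List.len_eq (PySem.List.sorted score (fun x => x) true),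
        PySem.List.length_sorted, ← PySem.List.len_eq score]
    have hn : (0:Int) ≤ PySem.List.len score := by rw [PySem.List.len_eq]; positivity
    have hnb : PySem.Int.floordiv (PySem.List.len score) m ≤ 0 := by
      unfold PySem.Int.floordiv
      rw [Int.fdiv_eq_ediv]
      have hq := Int.ediv_nonpos_of_nonneg_of_nonpos hn (le_of_lt hneg)
      rcases em ((0:Int) ≤ m ∨ m ∣ PySem.List.len score) with hc | hc
      · rw [if_pos hc]; omega
      · rw [if_neg hc]; omega
    rw [PySem.List.pyRange_one_eq_nil hnb, PySem.List.pyRange_one_eq_nil (by omega)]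
    simp
  · -- m > 0
    obtain ⟨m', rfl⟩ : ∃ m' : Nat, m = (m' : Int) :=
      ⟨m.toNat, (Int.toNat_of_nonneg (le_of_lt hpos)).symm⟩
    have hm1 : 1 ≤ m' := by exact_mod_cast hpos
    rw [pvA_pos (PySem.List.sorted score (fun x => x) true) m' hm1]
    have hfd : PySem.Int.floordiv (PySem.List.len score) ((m' : Int))
        = ((score.length / m' : Nat) : Int) := by
      rw [PySem.List.len_eq]
      unfold PySem.Int.floordiv
      rw [Int.fdiv_eq_ediv, if_pos (Or.inl (by positivity)), Int.natCast_div]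
      ring
    rw [hfd, PySem.List.pyRange_one]
    have hN : (((score.length / m' : Nat) : Int) + 1 - 1).toNat = score.length / m' := by
      rw [Int.add_sub_cancel, Int.toNat_natCast]
    rw [hN]
    obtain ⟨rest, done, c, v, heq, -, -, -⟩ :=
      bOuter score (PySem.Dict.counter score) (fun x => PySem.Dict.getD_counter score x) m' hm1
        (score.length / m') le_rfl
    rw [heq]
    rw [PySem.List.length_sorted, pvExp_eq_sorted score]

-- ===== VERDICT (by name: the statement is the Claim_ definition above) =====
theorem solution_spec : Claim_equal_solution := by
  intro k m score _ hpre
  unfold Spec_solution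
  exact pv_main k m score hpre
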